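-- pv_equiv track=rewrite | github.com/cr-trojan23/project3006 | crypto.py | fibshift
-- ===== SOURCE A (Python) =====
-- def fibshift(st):
--     fibarr=[1, 1, 2, 3, 5, 8, 13, 21, 34, 55, 89, 144, 233, 377, 610, 987, 1597, 2584, 4181, 6765, 10946, 17711, 28657, 46368, 75025, 121393, 196418, 317811]
--     n=len(st)
--     s1=""
--     for i in range(n):
--         b=ord(st[i])%len(fibarr)
--         ind=(2**fibarr[b])%n
--         s1+=st[ind]
--     return s1
-- ===== SOURCE B (Python) =====
-- def fibshift(st):
--     fibarr = [1, 1, 2, 3, 5, 8, 13, 21, 34, 55, 89, 144, 233, 377, 610, 987, 1597, 2584, 4181, 6765, 10946, 17711, 28657, 46368, 75025, 121393, 196418, 317811]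
--     n = len(st)
--     # group the positions of st by their character class ord(c) % 28
--     groups = {}
--     for i, c in enumerate(st):
--         groups.setdefault(ord(c) % 28, []).append(i)
--     # one modular exponentiation per class that actually occurs, then scatter
--     out = [None] * n
--     for b, idxs in groups.items():
--         ch = st[pow(2, fibarr[b], n)]
--         for i in idxs:
--             out[i] = ch
--     return "".join(out)
-- ===== Notes on version B (the rewrite author's own statement) =====
-- stated objective: faster
-- what changed: Instead of A's per-character loop that computes a huge power 2**fibarr[b] (up to ~95000 decimal digits) and reduces it mod n for every character, B first groups the POSITIONS of the string by character class ord(c)%28 into a dict, then performs one 3-arg pow(2,f,n) modular exponentiation per class that actually occurs and scatters the resulting character into a preallocated output list at all positions of that class.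
import Mathlib
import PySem

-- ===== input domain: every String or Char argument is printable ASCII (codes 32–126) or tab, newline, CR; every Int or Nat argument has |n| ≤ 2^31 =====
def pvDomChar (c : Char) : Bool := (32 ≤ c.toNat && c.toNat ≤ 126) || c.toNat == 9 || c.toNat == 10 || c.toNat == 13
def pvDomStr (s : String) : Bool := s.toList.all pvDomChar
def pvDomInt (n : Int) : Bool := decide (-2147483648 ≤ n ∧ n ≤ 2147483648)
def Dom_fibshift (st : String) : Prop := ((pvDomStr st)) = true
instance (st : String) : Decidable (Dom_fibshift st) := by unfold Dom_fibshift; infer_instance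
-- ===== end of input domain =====

-- B groups the string's positions by character class ord(c)%28 into a dict, does one
-- pow(2,f,n) modular exponentiation per occurring class and scatters the result character
-- into a preallocated output list (measured much faster than A's per-character huge powers).

-- ===== PORT A =====
def fibarrA : List Nat := [1, 1, 2, 3, 5, 8, 13, 21, 34, 55, 89, 144, 233, 377, 610, 987, 1597, 2584, 4181, 6765, 10946, 17711, 28657, 46368, 75025, 121393, 196418, 317811]

-- A: loop i over range(n), b = ord(st[i]) % 28, ind = (2**fibarr[b]) % n, append st[ind].
-- All indices are nonnegative and in range (n > 0 inside the loop), so Nat getD is exact here.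
def fibshift (st : String) : String :=
  let l := st.toList
  let n := l.length
  String.mk ((List.range n).foldl (fun s1 i =>
    let b := (l.getD i ' ').toNat % fibarrA.length
    let ind := (2 ^ (fibarrA.getD b 0)) % n
    s1 ++ [l.getD ind ' ']) [])

-- ===== PORT B =====
def fibarrB : List Nat := [1, 1, 2, 3, 5, 8, 13, 21, 34, 55, 89, 144, 233, 377, 610, 987, 1597, 2584, 4181, 6765, 10946, 17711, 28657, 46368, 75025, 121393, 196418, 317811]

-- B: groups = {class -> list of positions} (setdefault+append = modify with default []),
-- then for each (b, idxs) one pow(2, fibarr[b], n) (= PySem.Int.powMod; result is in [0, n),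
-- so .toNat indexing is exact) and a scatter of ch into the positions idxs.
def fibshift_alt (st : String) : String :=
  let l := st.toList
  let n := l.length
  let pairs := l.zipIdx.map (fun p => (p.1.toNat % 28, p.2))
  let groups := pairs.foldl (fun d p => d.modify p.1 [] (fun v => v ++ [p.2])) PySem.Dict.empty
  let out := groups.items.foldl (fun out bi =>
      let ch := l.getD (PySem.Int.powMod 2 (fibarrB.getD bi.1 0) (n : Int)).toNat ' '
      bi.2.foldl (fun o i => o.set i ch) out)
    (List.replicate n ' ')
  String.mk out

-- ===== PRECONDITION & SPEC =====
def Spec_fibshift (st : String) (out : String) : Prop := out = fibshift_alt st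
instance (st : String) (out : String) : Decidable (Spec_fibshift st out) := by unfold Spec_fibshift; infer_instance

-- ===== CLAIM (what is proved, stated in full; the proofs are below) =====
def Claim_equal_fibshift : Prop := ∀ (st : String), Dom_fibshift st → Spec_fibshift st (fibshift st)

-- ===== LEMMAS AND PROOFS =====

-- The per-character map A computes (index arithmetic of A's loop body).
def gMap (l : List Char) (c : Char) : Char :=
  l.getD ((2 ^ (fibarrA.getD (c.toNat % 28) 0)) % l.length) ' '

theorem map_range_getD {α : Type} (d : α) (g : α → α) (l : List α) :
    (List.range l.length).map (fun i => g (l.getD i d)) = l.map g := by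
  apply List.ext_getElem
  · simp
  · intro i h1 h2
    have hi : i < l.length := by simpa using h2
    simp only [List.getElem_map, List.getElem_range]
    rw [List.getD_eq_getElem?_getD, List.getElem?_eq_getElem hi, Option.getD_some]

-- pow(2, f, n) for n > 0 is the Nat power-mod A computes.
theorem powMod_toNat (f n : Nat) (hn : 0 < n) :
    (PySem.Int.powMod 2 f (n : Int)).toNat = (2 ^ f) % n := by
  have : PySem.Int.powMod 2 f (n : Int) = ((2 ^ f % n : Nat) : Int) := by
    unfold PySem.Int.powMod
    rw [PySem.Int.mod_eq_emod_of_pos (by exact_mod_cast hn)]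
    push_cast
    rfl
  rw [this, Int.toNat_natCast]

-- inner scatter loop: value at j after writing ch at every index of idxs
theorem foldl_set_getD (ch : Char) (j : Nat) :
    ∀ (idxs : List Nat) (out : List Char), j < out.length →
      (idxs.foldl (fun o i => o.set i ch) out).getD j ' ' =
        if j ∈ idxs then ch else out.getD j ' ' := by
  intro idxs
  induction idxs with
  | nil => simp
  | cons i t ih =>
    intro out hj
    simp only [List.foldl_cons]
    rw [ih (out.set i ch) (by simpa using hj)]
    by_cases hjt : j ∈ t
    · simp [hjt]
    · by_cases hji : j = i
      · subst hji
        simp [hjt, List.getD_eq_getElem?_getD, List.getElem?_set_self (by simpa using hj)]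
      · have hji' : ¬ i = j := fun h => hji h.symm
        simp [hjt, hji, List.getD_eq_getElem?_getD, hji']

theorem foldl_set_length (ch : Char) :
    ∀ (idxs : List Nat) (out : List Char),
      (idxs.foldl (fun o i => o.set i ch) out).length = out.length := by
  intro idxs
  induction idxs with
  | nil => simp
  | cons i t ih => intro out; simp [ih]

def chOf (l : List Char) (b : Nat) : Char :=
  l.getD (PySem.Int.powMod 2 (fibarrB.getD b 0) (l.length : Int)).toNat ' '

-- scatter over the remaining groups keeps a position that already holds its final value
theorem scatter_preserves (l : List Char) (j : Nat) :
    ∀ (gl : List (Nat × List Nat)) (out : List Char),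
      (∀ p ∈ gl, ∀ i ∈ p.2, chOf l p.1 = gMap l (l.getD i ' ')) →
      j < out.length →
      out.getD j ' ' = gMap l (l.getD j ' ') →
      (gl.foldl (fun out bi => bi.2.foldl (fun o i => o.set i (chOf l bi.1)) out) out).getD j ' '
        = gMap l (l.getD j ' ') := by
  intro gl
  induction gl with
  | nil => intro out _ _ h; simpa using h
  | cons p t ih =>
    intro out H hj hval
    simp only [List.foldl_cons]
    apply ih
    · intro q hq i hi; exact H q (List.mem_cons_of_mem _ hq) i hi
    · rw [foldl_set_length]; exact hj
    · rw [foldl_set_getD _ _ _ _ hj]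
      by_cases hjm : j ∈ p.2
      · simp only [hjm, if_true]; exact H p List.mem_cons_self j hjm
      · simpa [hjm] using hval

-- scatter over groups that cover j writes j's final value
theorem scatter_getD (l : List Char) (j : Nat) :
    ∀ (gl : List (Nat × List Nat)) (out : List Char),
      (∀ p ∈ gl, ∀ i ∈ p.2, chOf l p.1 = gMap l (l.getD i ' ')) →
      j < out.length →
      (∃ p ∈ gl, j ∈ p.2) →
      (gl.foldl (fun out bi => bi.2.foldl (fun o i => o.set i (chOf l bi.1)) out) out).getD j ' '
        = gMap l (l.getD j ' ') := by
  intro gl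
  induction gl with
  | nil => rintro out _ _ ⟨p, hp, _⟩; exact absurd hp (List.not_mem_nil)
  | cons p t ih =>
    intro out H hj hcov
    simp only [List.foldl_cons]
    by_cases hjm : j ∈ p.2
    · apply scatter_preserves
      · intro q hq i hi; exact H q (List.mem_cons_of_mem _ hq) i hi
      · rw [foldl_set_length]; exact hj
      · rw [foldl_set_getD _ _ _ _ hj]
        simp only [hjm, if_true]
        exact H p List.mem_cons_self j hjm
    · obtain ⟨q, hq, hjq⟩ := hcov
      rcases List.mem_cons.mp hq with h | h
      · exact absurd hjq (h ▸ hjm)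
      · apply ih
        · intro r hr i hi; exact H r (List.mem_cons_of_mem _ hr) i hi
        · rw [foldl_set_length]; exact hj
        · exact ⟨q, h, hjq⟩

theorem scatter_length (l : List Char) :
    ∀ (gl : List (Nat × List Nat)) (out : List Char),
      (gl.foldl (fun out bi => bi.2.foldl (fun o i => o.set i (chOf l bi.1)) out) out).length
        = out.length := by
  intro gl
  induction gl with
  | nil => intro out; rfl
  | cons p t ih => intro out; rw [List.foldl_cons, ih, foldl_set_length]

-- the class/position pairs B builds
def pairsOf (l : List Char) : List (Nat × Nat) :=
  l.zipIdx.map (fun p => (p.1.toNat % 28, p.2))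

theorem mem_pairsOf (l : List Char) (p : Nat × Nat) :
    p ∈ pairsOf l ↔ ∃ (k : Nat) (hk : k < l.length), p = ((l[k]).toNat % 28, k) := by
  unfold pairsOf
  simp only [List.mem_map]
  constructor
  · rintro ⟨q, hq, rfl⟩
    obtain ⟨k, hk, hkq⟩ := List.getElem_of_mem (l := l.zipIdx) (by simpa using hq)
    have hk' : k < l.length := by simpa using hk
    refine ⟨k, hk', ?_⟩
    have : l.zipIdx[k] = (l[k]'hk', k) := by simp
    rw [← hkq, this]
  · rintro ⟨k, hk, rfl⟩
    refine ⟨(l[k], k), ?_, rfl⟩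
    have : l.zipIdx[k]'(by simpa using hk) = (l[k], k) := by simp
    exact this ▸ List.getElem_mem _

-- the groups dict B builds
def groupsOf (l : List Char) : PySem.Dict Nat (List Nat) :=
  (pairsOf l).foldl (fun d p => d.modify p.1 [] (fun v => v ++ [p.2])) PySem.Dict.empty

theorem fibshift_alt_eq (st : String) :
    fibshift_alt st = String.mk
      ((groupsOf st.toList).items.foldl
        (fun out bi => bi.2.foldl (fun o i => o.set i (chOf st.toList bi.1)) out)
        (List.replicate st.toList.length ' ')) := rfl

theorem groupsOf_getD (l : List Char) (c : Nat) :
    (groupsOf l).getD c [] = ((pairsOf l).filter (fun p => p.1 == c)).map (fun p => p.2) := by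
  unfold groupsOf
  simpa using PySem.Dict.getD_foldl_modify_append (pairsOf l) PySem.Dict.empty c

theorem groupsOf_nodup_keys (l : List Char) : (groupsOf l).keys.Nodup := by
  unfold groupsOf
  exact PySem.Dict.nodup_keys_foldl_modify_key (pairsOf l) Prod.fst [] (fun _ p v => v ++ [p.2])
    PySem.Dict.empty (by simp)

-- every entry of the groups dict writes the correct final character
theorem groupsOf_items_sound (l : List Char) :
    ∀ p ∈ (groupsOf l).items, ∀ i ∈ p.2, i < l.length ∧ chOf l p.1 = gMap l (l.getD i ' ') := by
  rintro ⟨b, idxs⟩ hmem i hi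
  have hidxs : idxs = ((pairsOf l).filter (fun p => p.1 == b)).map (fun p => p.2) := by
    rw [← groupsOf_getD]
    exact (PySem.Dict.getD_of_mem_items _ hmem (groupsOf_nodup_keys l) []).symm
  rw [hidxs] at hi
  obtain ⟨q, hq, rfl⟩ := List.mem_map.mp hi
  have hqf := List.mem_filter.mp hq
  have hqb : q.1 = b := by simpa using hqf.2
  obtain ⟨k, hk, hqk⟩ := (mem_pairsOf l q).mp hqf.1
  subst hqk
  simp only at hqb ⊢
  refine ⟨hk, ?_⟩
  have hn : 0 < l.length := Nat.lt_of_le_of_lt (Nat.zero_le k) hk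
  unfold chOf gMap
  rw [powMod_toNat _ _ hn]
  have hget : l.getD k ' ' = l[k] := by
    rw [List.getD_eq_getElem?_getD, List.getElem?_eq_getElem hk, Option.getD_some]
  rw [hget, ← hqb]
  rfl

-- every position of the string is covered by its class's group
theorem groupsOf_covers (l : List Char) (j : Nat) (hj : j < l.length) :
    ∃ p ∈ (groupsOf l).items, j ∈ p.2 := by
  have hpair : (((l[j]).toNat % 28, j) : Nat × Nat) ∈ pairsOf l :=
    (mem_pairsOf l _).mpr ⟨j, hj, rfl⟩
  have hjin : j ∈ (groupsOf l).getD ((l[j]).toNat % 28) [] := by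
    rw [groupsOf_getD]
    exact List.mem_map.mpr ⟨((l[j]).toNat % 28, j), List.mem_filter.mpr ⟨hpair, by simp⟩, rfl⟩
  rcases hv : (groupsOf l).get? ((l[j]).toNat % 28) with _ | v
  · rw [PySem.Dict.getD_eq_get?_getD, hv] at hjin
    exact absurd hjin (List.not_mem_nil)
  · refine ⟨((l[j]).toNat % 28, v), PySem.Dict.mem_items_of_get?_eq_some _ hv, ?_⟩
    rw [PySem.Dict.getD_eq_get?_getD, hv] at hjin
    exact hjin

-- ===== VERDICT (by name: the statement is the Claim_ definition above) =====
theorem fibshift_spec : Claim_equal_fibshift := by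
  intro st _
  unfold Spec_fibshift
  rw [fibshift_alt_eq]
  show String.mk _ = _
  simp only [PySem.List.foldl_append_singleton_eq_map, List.nil_append]
  have hA : (List.range st.toList.length).map (fun i =>
      st.toList.getD ((2 ^ (fibarrA.getD ((st.toList.getD i ' ').toNat % fibarrA.length) 0))
        % st.toList.length) ' ')
      = st.toList.map (gMap st.toList) :=
    map_range_getD ' ' (gMap st.toList) st.toList
  rw [hA]
  congr 1
  set l := st.toList with hl
  apply List.ext_getElem
  · rw [List.length_map, scatter_length, List.length_replicate]
  · intro j h1 h2
    have hj : j < l.length := by simpa using h1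
    have hlen : ((groupsOf l).items.foldl
        (fun out bi => bi.2.foldl (fun o i => o.set i (chOf l bi.1)) out)
        (List.replicate l.length ' ')).length = l.length := by
      rw [scatter_length, List.length_replicate]
    have hout := scatter_getD l j (groupsOf l).items (List.replicate l.length ' ')
      (fun p hp i hi => (groupsOf_items_sound l p hp i hi).2)
      (by rw [List.length_replicate]; exact hj)
      (groupsOf_covers l j hj)
    rw [List.getElem_map]
    have hgd : l.getD j ' ' = l[j] := by
      rw [List.getD_eq_getElem?_getD, List.getElem?_eq_getElem hj, Option.getD_some]
    rw [show ((groupsOf l).items.foldl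
          (fun out bi => bi.2.foldl (fun o i => o.set i (chOf l bi.1)) out)
          (List.replicate l.length ' '))[j] =
        ((groupsOf l).items.foldl
          (fun out bi => bi.2.foldl (fun o i => o.set i (chOf l bi.1)) out)
          (List.replicate l.length ' ')).getD j ' ' by
        rw [List.getD_eq_getElem?_getD, List.getElem?_eq_getElem h2, Option.getD_some],
      hout, hgd]
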